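-- pv_equiv track=rewrite | github.com/BTMAN1489-1/GeoDesy | GeoDesy/utils/card_tools.py | _unique_choices
-- ===== SOURCE A (Python) =====
-- def _unique_choices(names, values):
--     unique_filter = set()
--     result = []
--     for name in names:
--         value = values.pop(0)
--         if name not in unique_filter:
--             result.append((name, value))
--         unique_filter.add(name)
--
--     return result
-- ===== SOURCE B (Python) =====
-- def _unique_choices(names, values):
--     # Stage 1: pair names with the consumed prefix of values (consumes it in place, like A's pops).
--     k = len(names)
--     pairs = list(zip(names, values[:k]))
--     del values[:k]
--     # Stage 2: worklist dedup — keep the head pair, discard every later pair with the same name.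
--     out = []
--     while pairs:
--         name, value = pairs[0]
--         out.append((name, value))
--         pairs = [p for p in pairs[1:] if p[0] != name]
--     return out
-- ===== Notes on version B (the rewrite author's own statement) =====
-- stated objective: alternative
-- what changed: Two staged passes instead of A's single popping loop with a seen-set: first zip names with the consumed prefix of values, then deduplicate with a shrinking worklist that keeps the head pair and filters out all later pairs with the same name (no seen-set, no per-element membership branch).
import Mathlib
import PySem

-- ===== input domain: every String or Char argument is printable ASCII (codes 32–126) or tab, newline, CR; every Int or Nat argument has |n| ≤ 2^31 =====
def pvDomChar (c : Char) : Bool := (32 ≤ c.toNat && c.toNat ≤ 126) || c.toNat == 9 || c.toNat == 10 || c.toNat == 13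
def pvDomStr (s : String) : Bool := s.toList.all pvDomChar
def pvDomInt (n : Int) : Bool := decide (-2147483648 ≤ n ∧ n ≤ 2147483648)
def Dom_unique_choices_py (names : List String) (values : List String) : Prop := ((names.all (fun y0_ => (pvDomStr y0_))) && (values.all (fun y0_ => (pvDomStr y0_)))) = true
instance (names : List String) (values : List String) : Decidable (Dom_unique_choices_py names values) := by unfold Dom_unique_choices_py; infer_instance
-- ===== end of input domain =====

-- B stages the work: zip names with the consumed values prefix, then worklist-dedup (keep the head
-- pair, filter out later pairs with the same name) — no seen-set. Return-value equivalence; both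
-- Python versions remove the first len(names) elements of `values` in place.

-- ===== PORT A =====
-- loop body of A: pop values[0], append (name, value) to result if name unseen, add name to the set
def uc_aStep (st : PySem.Set String × List (String × String) × List String) (name : String) :
    PySem.Set String × List (String × String) × List String :=
  match PySem.List.pop? st.2.2 0 with
  | none => st   -- Python raises IndexError here; excluded by Pre_
  | some (value, rest) =>
      (PySem.Set.add st.1 name,
       (if PySem.Set.contains st.1 name then st.2.1 else st.2.1 ++ [(name, value)]),
       rest)

def unique_choices_py (names : List String) (values : List String) : List (String × String) :=
  (names.foldl uc_aStep (PySem.Set.empty, [], values)).2.1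

-- ===== PORT B =====
-- B's while loop over the shrinking worklist: keep the head pair, continue on the tail filtered
-- of pairs carrying the head's name. Fuel = initial worklist length, which always dominates the
-- current worklist (the filtered tail is shorter), so the 0-fuel branch is unreachable.
def uc_dedupGo : Nat → List (String × String) → List (String × String)
  | _, [] => []
  | 0, _ :: _ => []   -- unreachable totality guard
  | k + 1, (n, v) :: t => (n, v) :: uc_dedupGo k (t.filter (fun p => p.1 ≠ n))

def unique_choices_py_alt (names : List String) (values : List String) : List (String × String) :=
  -- pairs = list(zip(names, values[:len(names)]))
  (fun pairs => uc_dedupGo pairs.length pairs)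
    (names.zip (PySem.List.slice values none (some (names.length : Int))))

-- ===== PRECONDITION & SPEC =====
-- A raises IndexError (values.pop(0) on empty) when values has fewer elements than names.
def Pre_unique_choices_py (names : List String) (values : List String) : Prop :=
  names.length ≤ values.length
instance (names : List String) (values : List String) : Decidable (Pre_unique_choices_py names values) := by unfold Pre_unique_choices_py; infer_instance

def pvWitness_unique_choices_py : List String × List String := (["a", "b", "a"], ["1", "2", "3"])

def Spec_unique_choices_py (names : List String) (values : List String) (out : List (String × String)) : Prop := out = unique_choices_py_alt names values
instance (names : List String) (values : List String) (out : List (String × String)) : Decidable (Spec_unique_choices_py names values out) := by unfold Spec_unique_choices_py; infer_instance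

-- ===== CLAIM (what is proved, stated in full; the proofs are below) =====
def Claim_equal_unique_choices_py : Prop := ∀ (names : List String) (values : List String), Dom_unique_choices_py names values → Pre_unique_choices_py names values → Spec_unique_choices_py names values (unique_choices_py names values)

-- ===== LEMMAS AND PROOFS =====

-- Common specification: first-occurrence dedup of the zipped pairs, relative to a set of seen names.
def ucSpec (s : PySem.Set String) : List (String × String) → List (String × String)
  | [] => []
  | (n, v) :: t =>
      if n ∈ s then ucSpec s t
      else (n, v) :: ucSpec (PySem.Set.add s n) t

-- A's fold equals ucSpec.
theorem uc_a_spec (names : List String) :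
    ∀ (s : PySem.Set String) (r : List (String × String)) (vs : List String),
      names.length ≤ vs.length →
      (names.foldl uc_aStep (s, r, vs)).2.1 = r ++ ucSpec s (names.zip vs) := by
  induction names with
  | nil => intro s r vs _; simp [ucSpec]
  | cons name rest ih =>
      intro s r vs hlen
      cases vs with
      | nil => simp at hlen
      | cons v vrest =>
          simp only [List.foldl_cons, List.zip_cons_cons]
          have hstep : uc_aStep (s, r, v :: vrest) name =
              (PySem.Set.add s name,
               (if PySem.Set.contains s name then r else r ++ [(name, v)]),
               vrest) := by
            simp [uc_aStep, PySem.List.pop?_zero_cons]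
          rw [hstep]
          have hlen' : rest.length ≤ vrest.length := by simpa using hlen
          by_cases hmem : name ∈ s
          · have hc : PySem.Set.contains s name = true := by
              simp [PySem.Set.contains, hmem]
            have hadd : PySem.Set.add s name = s := by
              simp [PySem.Set.add, PySem.Set.contains, hmem]
            rw [if_pos hc, hadd, ih s r vrest hlen']
            simp [ucSpec, hmem]
          · have hc : PySem.Set.contains s name = false := by
              simp [PySem.Set.contains, hmem]
            rw [if_neg (by simp [PySem.Set.contains, hmem]),
                ih (PySem.Set.add s name) (r ++ [(name, v)]) vrest hlen']
            simp [ucSpec, hmem]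

-- uc_dedupGo ignores the exact fuel as long as it dominates the worklist length.
theorem uc_go_congr (k1 : Nat) :
    ∀ (k2 : Nat) (ps : List (String × String)), ps.length ≤ k1 → ps.length ≤ k2 →
      uc_dedupGo k1 ps = uc_dedupGo k2 ps := by
  induction k1 with
  | zero =>
      intro k2 ps h1 _
      have : ps = [] := List.length_eq_zero_iff.mp (Nat.le_zero.mp h1)
      subst this
      cases k2 <;> simp [uc_dedupGo]
  | succ k ih =>
      intro k2 ps h1 h2
      cases ps with
      | nil => cases k2 <;> simp [uc_dedupGo]
      | cons hd t =>
          obtain ⟨n, v⟩ := hd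
          cases k2 with
          | zero => simp at h2
          | succ k2' =>
              have hf1 : (t.filter (fun p => p.1 ≠ n)).length ≤ k :=
                le_trans (List.length_filter_le _ _) (by simpa using h1)
              have hf2 : (t.filter (fun p => p.1 ≠ n)).length ≤ k2' :=
                le_trans (List.length_filter_le _ _) (by simpa using h2)
              simp only [uc_dedupGo]
              rw [ih k2' _ hf1 hf2]

-- B's worklist dedup equals ucSpec: the seen-set is exactly the filter accumulated so far.
theorem uc_b_spec (k : Nat) :
    ∀ (ps : List (String × String)), ps.length ≤ k → ∀ (s : PySem.Set String),
      ucSpec s ps = uc_dedupGo k (ps.filter (fun p => !(PySem.Set.contains s p.1))) := by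
  induction k with
  | zero =>
      intro ps hps s
      have : ps = [] := List.length_eq_zero_iff.mp (Nat.le_zero.mp hps)
      subst this; simp [ucSpec, uc_dedupGo]
  | succ k ih =>
      intro ps hps s
      cases ps with
      | nil => simp [ucSpec, uc_dedupGo]
      | cons hd t =>
          obtain ⟨n, v⟩ := hd
          have ht : t.length ≤ k := by simpa using hps
          have htk : (t.filter (fun p => !(PySem.Set.contains s p.1))).length ≤ k :=
            le_trans (List.length_filter_le _ _) ht
          by_cases hmem : n ∈ s
          · have hdrop : ((n, v) :: t).filter (fun p => !(PySem.Set.contains s p.1))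
                = t.filter (fun p => !(PySem.Set.contains s p.1)) := by
              simp [PySem.Set.contains, hmem]
            rw [hdrop, ← uc_go_congr k (k + 1) _ htk (le_trans htk (Nat.le_succ k)),
                ← ih t ht s]
            simp [ucSpec, hmem]
          · have hkeep : ((n, v) :: t).filter (fun p => !(PySem.Set.contains s p.1))
                = (n, v) :: t.filter (fun p => !(PySem.Set.contains s p.1)) := by
              simp [PySem.Set.contains, hmem]
            have hfil : (t.filter (fun p => !(PySem.Set.contains s p.1))).filter
                  (fun p => p.1 ≠ n)
                = t.filter (fun p => !(PySem.Set.contains (PySem.Set.add s n) p.1)) := by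
              rw [List.filter_filter]
              apply List.filter_congr
              intro p _
              by_cases hps' : p.1 ∈ s <;> by_cases hpn : p.1 = n <;>
                simp [PySem.Set.contains, PySem.Set.mem_add, hps', hpn]
            rw [hkeep]
            simp only [uc_dedupGo, hfil]
            rw [← ih t ht (PySem.Set.add s n)]
            simp [ucSpec, hmem]

-- zipping against a take of at least names.length is zipping against the whole list
theorem uc_zip_take (names : List String) :
    ∀ (vs : List String), names.zip (vs.take names.length) = names.zip vs := by
  induction names with
  | nil => intro vs; simp
  | cons n t ih =>
      intro vs
      cases vs with
      | nil => simp
      | cons v vrest => simp [List.zip_cons_cons, ih vrest]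

-- ===== VERDICT (by name: the statement is the Claim_ definition above) =====
theorem unique_choices_py_spec : Claim_equal_unique_choices_py := by
  intro names values _ hpre
  unfold Spec_unique_choices_py unique_choices_py unique_choices_py_alt
  rw [uc_a_spec names PySem.Set.empty [] values hpre]
  simp only [PySem.List.slice_to_natCast, uc_zip_take]
  rw [uc_b_spec (names.zip values).length (names.zip values) le_rfl PySem.Set.empty]
  have : (names.zip values).filter
      (fun p => !(PySem.Set.contains PySem.Set.empty p.1)) = names.zip values := by
    simp [PySem.Set.contains, PySem.Set.empty]
  rw [this]
  simp
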